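-- pv_equiv track=rewrite | github.com/ThinkWithOps/thinkwithops-ai-cicd-projects | project-03_slack-pipeline-reporter/report_to_slack.py | extract_error_line
-- ===== SOURCE A (Python) =====
-- def extract_error_line(log_text: str) -> str:
--     """Pick a concise error line from a log snippet."""
--     candidates = []
--     for line in log_text.splitlines():
--         stripped = line.strip()
--         if not stripped:
--             continue
--         lower = stripped.lower()
--         if any(token in lower for token in ["error", "exception", "failed", "fail", "fatal"]):
--             candidates.append(stripped)
--     if candidates:
--         return candidates[0]
--     # Fallback to last non-empty line
--     for line in reversed(log_text.splitlines()):
--         stripped = line.strip()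
--         if stripped:
--             return stripped
--     return ""
-- ===== SOURCE B (Python) =====
-- def extract_error_line(log_text: str) -> str:
--     """Pick a concise error line from a log snippet."""
--     first_error = None
--     last_nonempty = None
--     for line in log_text.splitlines():
--         stripped = line.strip()
--         if not stripped:
--             continue
--         last_nonempty = stripped
--         if first_error is None:
--             lower = stripped.lower()
--             if any(token in lower for token in ["error", "exception", "failed", "fail", "fatal"]):
--                 first_error = stripped
--     if first_error is not None:
--         return first_error
--     if last_nonempty is not None:
--         return last_nonempty
--     return ""
-- ===== Notes on version B (the rewrite author's own statement) =====
-- stated objective: simpler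
-- what changed: Replaces A's two passes (collect all keyword lines into a list then a second reversed scan for the fallback) by one forward pass that tracks the first keyword line and the last non-empty line in two variables.
import Mathlib
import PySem

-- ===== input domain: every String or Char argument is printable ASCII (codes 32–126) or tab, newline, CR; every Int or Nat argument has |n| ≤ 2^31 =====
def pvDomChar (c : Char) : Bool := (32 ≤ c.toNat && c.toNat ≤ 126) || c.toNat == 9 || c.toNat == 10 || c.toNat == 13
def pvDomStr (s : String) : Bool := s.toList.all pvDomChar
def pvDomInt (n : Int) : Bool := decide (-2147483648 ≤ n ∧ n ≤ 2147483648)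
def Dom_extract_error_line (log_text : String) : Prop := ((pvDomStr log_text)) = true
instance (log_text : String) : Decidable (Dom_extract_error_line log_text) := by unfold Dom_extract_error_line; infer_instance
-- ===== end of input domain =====

-- B replaces A's collect-all-candidates pass plus a second reversed scan by one forward pass
-- tracking the first error line and the last non-empty line (objective: simpler).

-- ===== PORT A =====
-- second loop of A: 'for line in reversed(...): if stripped: return stripped' / 'return ""'
def pvFallback : List String → String
  | [] => ""
  | l :: rest =>
    let stripped := PySem.Str.strip l
    if stripped == "" then pvFallback rest else stripped

def extract_error_line (log_text : String) : String :=
  let candidates :=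
    (PySem.Str.splitlines log_text).foldl (fun acc line =>
      let stripped := PySem.Str.strip line
      if stripped == "" then acc
      else
        let lower := PySem.Str.lower stripped
        if ["error", "exception", "failed", "fail", "fatal"].any
            (fun token => PySem.Str.isIn token lower) then acc ++ [stripped] else acc) []
  match candidates with
  | c :: _ => c
  | [] => pvFallback (PySem.Str.splitlines log_text).reverse

-- ===== PORT B =====
def extract_error_line_alt (log_text : String) : String :=
  let st :=
    (PySem.Str.splitlines log_text).foldl
      (fun (st : Option String × Option String) line =>
        let stripped := PySem.Str.strip line
        if stripped == "" then st
        else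
          let first_error :=
            match st.1 with
            | some e => some e
            | none =>
              let lower := PySem.Str.lower stripped
              if ["error", "exception", "failed", "fail", "fatal"].any
                  (fun token => PySem.Str.isIn token lower) then some stripped else none
          (first_error, some stripped))
      (none, none)
  match st.1 with
  | some e => e
  | none =>
    match st.2 with
    | some l => l
    | none => ""

-- ===== PRECONDITION & SPEC =====
def Spec_extract_error_line (log_text : String) (out : String) : Prop := out = extract_error_line_alt log_text
instance (log_text : String) (out : String) : Decidable (Spec_extract_error_line log_text out) := by unfold Spec_extract_error_line; infer_instance

-- ===== CLAIM (what is proved, stated in full; the proofs are below) =====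
def Claim_equal_extract_error_line : Prop := ∀ (log_text : String), Dom_extract_error_line log_text → Spec_extract_error_line log_text (extract_error_line log_text)

-- ===== LEMMAS AND PROOFS =====

-- line is non-blank after stripping
def pvNE (l : String) : Bool := !(PySem.Str.strip l == "")

-- line is non-blank and its lowercased strip contains an error keyword
def pvCond (l : String) : Bool :=
  pvNE l && ["error", "exception", "failed", "fail", "fatal"].any
    (fun token => PySem.Str.isIn token (PySem.Str.lower (PySem.Str.strip l)))

-- A's loop body, normalised to a single test on pvCond
theorem pvStepA_eq :
    (fun (acc : List String) line =>
      let stripped := PySem.Str.strip line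
      if stripped == "" then acc
      else
        let lower := PySem.Str.lower stripped
        if ["error", "exception", "failed", "fail", "fatal"].any
            (fun token => PySem.Str.isIn token lower) then acc ++ [stripped] else acc)
    = (fun (acc : List String) l =>
        if pvCond l then acc ++ [PySem.Str.strip l] else acc) := by
  funext acc l
  show (if (PySem.Str.strip l == "") = true then acc
      else if (["error", "exception", "failed", "fail", "fatal"].any
          (fun token => PySem.Str.isIn token (PySem.Str.lower (PySem.Str.strip l)))) = true
        then acc ++ [PySem.Str.strip l] else acc)
    = if pvCond l = true then acc ++ [PySem.Str.strip l] else acc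
  by_cases h : (PySem.Str.strip l == "") = true
  · have hc : pvCond l = false := by simp [pvCond, pvNE, h]
    rw [if_pos h, hc]
    simp
  · have hb : (PySem.Str.strip l == "") = false := by
      cases hx : (PySem.Str.strip l == "") with
      | true => exact absurd hx h
      | false => rfl
    have hthis : pvCond l = ["error", "exception", "failed", "fail", "fatal"].any
        (fun token => PySem.Str.isIn token (PySem.Str.lower (PySem.Str.strip l))) := by
      unfold pvCond pvNE
      rw [hb]
      simp
    rw [if_neg h, hthis]

-- A's reversed fallback loop returns the first pvNE line of its input, stripped
theorem pvFallback_eq (lines : List String) :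
    pvFallback lines = ((lines.find? pvNE).map PySem.Str.strip).getD "" := by
  induction lines with
  | nil => rfl
  | cons l rest ih =>
    by_cases h : (PySem.Str.strip l == "") = true
    · simp [pvFallback, pvNE, List.find?_cons, h, ih]
    · simp [pvFallback, pvNE, List.find?_cons, h]

-- B's single pass computes (first keyword line, last non-blank line), stripped
theorem pvFoldB_eq (lines : List String) (fe ln : Option String) :
    lines.foldl
      (fun (st : Option String × Option String) line =>
        let stripped := PySem.Str.strip line
        if stripped == "" then st
        else
          let first_error :=
            match st.1 with
            | some e => some e
            | none =>
              let lower := PySem.Str.lower stripped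
              if ["error", "exception", "failed", "fail", "fatal"].any
                  (fun token => PySem.Str.isIn token lower) then some stripped else none
          (first_error, some stripped))
      (fe, ln)
    = (fe.or ((lines.find? pvCond).map PySem.Str.strip),
       ((lines.reverse.find? pvNE).map PySem.Str.strip).or ln) := by
  induction lines generalizing fe ln with
  | nil => simp
  | cons l rest ih =>
    simp only [List.foldl_cons, List.reverse_cons, List.find?_append, List.find?_cons]
    by_cases h : (PySem.Str.strip l == "") = true
    · have hc : pvCond l = false := by simp [pvCond, pvNE, h]
      have hn : pvNE l = false := by simp [pvNE, h]
      simp only [h, if_true, ih, hc, hn, cond_false, List.find?_nil, Option.or_none]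
    · have hn : pvNE l = true := by simp [pvNE, h]
      simp only [h, if_false, Bool.false_eq_true]
      cases fe with
      | some e =>
        rw [show (match (some e : Option String) with
            | some e => some e
            | none =>
              if (["error", "exception", "failed", "fail", "fatal"].any
                  (fun token => PySem.Str.isIn token (PySem.Str.lower (PySem.Str.strip l)))) = true then
                some (PySem.Str.strip l) else none) = some e from rfl]
        rw [ih]
        simp only [Option.some_or, Prod.mk.injEq, true_and, hn, cond_true]
        cases rest.reverse.find? pvNE <;> simp
      | none =>
        cases h2 : ["error", "exception", "failed", "fail", "fatal"].any
            (fun token => PySem.Str.isIn token (PySem.Str.lower (PySem.Str.strip l))) with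
        | true =>
          have hc : pvCond l = true := by unfold pvCond; rw [hn, h2]; rfl
          simp only [h2, if_true]
          rw [ih]
          simp only [Option.some_or, Option.none_or, hc, cond_true, Prod.mk.injEq,
            Option.map_some, hn, true_and]
          cases rest.reverse.find? pvNE <;> simp
        | false =>
          have hc : pvCond l = false := by unfold pvCond; rw [hn, h2]; rfl
          simp only [h2, Bool.false_eq_true, if_false]
          rw [ih]
          simp only [Option.none_or, hc, cond_false, Prod.mk.injEq, hn, cond_true, true_and]
          cases rest.reverse.find? pvNE <;> simp

-- ===== VERDICT (by name: the statement is the Claim_ definition above) =====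
theorem extract_error_line_spec : Claim_equal_extract_error_line := by
  intro log_text _
  unfold Spec_extract_error_line extract_error_line extract_error_line_alt
  rw [pvStepA_eq, PySem.List.foldl_append_if, pvFoldB_eq, pvFallback_eq]
  simp only [List.nil_append, Option.none_or, Option.or_none]
  cases hf : (PySem.Str.splitlines log_text).find? pvCond with
  | none =>
    have hcand : (PySem.Str.splitlines log_text).filter pvCond = [] := by
      have : ((PySem.Str.splitlines log_text).filter pvCond).head? = (PySem.Str.splitlines log_text).find? pvCond := List.head?_filter
      rw [hf] at this
      exact List.head?_eq_none_iff.mp this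
    rw [hcand]
    simp only [List.map_nil, Option.map_none]
    cases (PySem.Str.splitlines log_text).reverse.find? pvNE <;> simp
  | some x =>
    have hh : ((PySem.Str.splitlines log_text).filter pvCond).head? = some x := by
      rw [List.head?_filter, hf]
    cases hcand : (PySem.Str.splitlines log_text).filter pvCond with
    | nil => rw [hcand] at hh; simp at hh
    | cons c cs =>
      rw [hcand] at hh
      simp only [List.head?_cons, Option.some.injEq] at hh
      simp [hh]
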